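-- pv_equiv track=rewrite | github.com/Stefano-Zangiacomi/Japanese_gram_voc_detection | Read_sentence.py | data_preparation
-- ===== SOURCE A (Python) =====
-- def data_preparation(csv):
--     regles = []
--     explications = []
--     for l in csv:
--         l.strip()
--         ligne = l.split(';')
--         if 'null' not in ligne:
--             regles.append(ligne[0])
--             explications.append(ligne[1])
--
--     return regles, explications
-- ===== SOURCE B (Python) =====
-- def data_preparation(csv):
--     # Structural recursion on the list: recurse on the tail first, then
--     # prepend this line's fields, building both outputs back-to-front.
--     if not csv:
--         return [], []
--     regles, explications = data_preparation(csv[1:])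
--     parts = csv[0].split(';')
--     if 'null' in parts:
--         return regles, explications
--     return [parts[0]] + regles, [parts[1]] + explications
-- ===== Notes on version B (the rewrite author's own statement) =====
-- stated objective: alternative
-- what changed: Replaces A's imperative loop with two growing append-accumulators by structural recursion that recurses on the tail first and prepends each kept line's two fields, building both lists back-to-front.
import Mathlib
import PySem

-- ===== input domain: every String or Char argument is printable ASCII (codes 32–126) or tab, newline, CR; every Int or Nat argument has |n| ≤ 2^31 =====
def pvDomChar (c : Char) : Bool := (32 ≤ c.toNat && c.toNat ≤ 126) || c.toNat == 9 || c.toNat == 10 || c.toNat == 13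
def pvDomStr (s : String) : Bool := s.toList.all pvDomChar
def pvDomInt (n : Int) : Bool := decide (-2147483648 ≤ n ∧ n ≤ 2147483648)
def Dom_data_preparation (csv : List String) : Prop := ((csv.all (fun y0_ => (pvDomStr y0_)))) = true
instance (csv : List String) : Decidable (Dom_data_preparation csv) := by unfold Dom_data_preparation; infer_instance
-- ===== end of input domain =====

-- B keeps A's return value; it is a different decomposition (tail-first structural recursion
-- with prepend instead of a loop with two append-accumulators), not faster.

-- ===== PORT A =====
-- A: loop with two growing accumulators; ligne[0]/ligne[1] via pyGet? (Pre_ guarantees some).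
def data_preparation (csv : List String) : List String × List String :=
  csv.foldl
    (fun acc l =>
      let ligne := (PySem.Str.split? l ";").getD []
      if "null" ∈ ligne then acc
      else (acc.1 ++ [(PySem.List.pyGet? ligne 0).getD ""],
            acc.2 ++ [(PySem.List.pyGet? ligne 1).getD ""]))
    ([], [])

-- ===== PORT B =====
-- B: structural recursion on the list, recursing on the tail first and prepending
-- the current line's two fields, building both outputs back-to-front.
def data_preparation_alt (csv : List String) : List String × List String :=
  match csv with
  | [] => ([], [])
  | l :: t =>
    let rest := data_preparation_alt t
    let parts := (PySem.Str.split? l ";").getD []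
    if "null" ∈ parts then rest
    else ((PySem.List.pyGet? parts 0).getD "" :: rest.1,
          (PySem.List.pyGet? parts 1).getD "" :: rest.2)

-- ===== PRECONDITION & SPEC =====
-- Pre_ excludes exactly the lines on which A raises IndexError: a kept line (no 'null' field)
-- whose split has fewer than 2 fields (no ';' in the line).
def Pre_data_preparation (csv : List String) : Prop :=
  ∀ l ∈ csv, "null" ∈ (PySem.Str.split? l ";").getD [] ∨ 2 ≤ ((PySem.Str.split? l ";").getD []).length
instance (csv : List String) : Decidable (Pre_data_preparation csv) := by
  unfold Pre_data_preparation; infer_instance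
def pvWitness_data_preparation : List String := ["a;b", "null;x", "p;q;r"]
def Spec_data_preparation (csv : List String) (out : List String × List String) : Prop := out = data_preparation_alt csv
instance (csv : List String) (out : List String × List String) : Decidable (Spec_data_preparation csv out) := by unfold Spec_data_preparation; infer_instance

-- ===== CLAIM (what is proved, stated in full; the proofs are below) =====
def Claim_equal_data_preparation : Prop := ∀ (csv : List String), Dom_data_preparation csv → Pre_data_preparation csv → Spec_data_preparation csv (data_preparation csv)

-- ===== LEMMAS AND PROOFS =====

-- A's fold, started from any accumulator, appends B's two output columns.
theorem data_preparation_fold (csv : List String) (r e : List String) :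
    csv.foldl
      (fun acc l =>
        let ligne := (PySem.Str.split? l ";").getD []
        if "null" ∈ ligne then acc
        else (acc.1 ++ [(PySem.List.pyGet? ligne 0).getD ""],
              acc.2 ++ [(PySem.List.pyGet? ligne 1).getD ""]))
      (r, e)
    = (r ++ (data_preparation_alt csv).1, e ++ (data_preparation_alt csv).2) := by
  induction csv generalizing r e with
  | nil => simp [data_preparation_alt]
  | cons l t ih =>
    simp only [List.foldl_cons, data_preparation_alt]
    by_cases h : "null" ∈ (PySem.Str.split? l ";").getD []
    · simp [h, ih]
    · simp [h, ih]

theorem data_preparation_spec_aux (csv : List String) :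
    data_preparation csv = data_preparation_alt csv := by
  unfold data_preparation
  rw [data_preparation_fold]
  simp

-- ===== VERDICT (by name: the statement is the Claim_ definition above) =====
theorem data_preparation_spec : Claim_equal_data_preparation := by
  intro csv _ _
  exact data_preparation_spec_aux csv
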